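-- pv_equiv track=rewrite | github.com/Yurie-Koga/Python | IntroToAlgorithms-master/Tic-Tac-Toe/game_data.py | list_vertical
-- ===== SOURCE A (Python) =====
-- def list_vertical(data: []):
--     """
--     Return a list of vertical lists
--     :param data: a list of a game data
--     :return : a list of vertical lists
--     """
--     l = []
--     for col in range(3):
--         c = []
--         for row in range(0, 9, 3):
--             c.append(data[row + col])
--         l.append(c)
--     return l
-- ===== SOURCE B (Python) =====
-- def list_vertical(data: []):
--     """
--     Return a list of vertical lists
--     :param data: a list of a game data
--     :return : a list of vertical lists
--     """
--     columns = [[], [], []]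
--     for i in range(9):
--         columns[i % 3].append(data[i])
--     return columns
-- ===== Notes on version B (the rewrite author's own statement) =====
-- stated objective: alternative
-- what changed: Replaces the nested column-major double loop (for each column, gather every third element) with a single row-major pass over range(9) that distributes each element into columns[i % 3].
import Mathlib
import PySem

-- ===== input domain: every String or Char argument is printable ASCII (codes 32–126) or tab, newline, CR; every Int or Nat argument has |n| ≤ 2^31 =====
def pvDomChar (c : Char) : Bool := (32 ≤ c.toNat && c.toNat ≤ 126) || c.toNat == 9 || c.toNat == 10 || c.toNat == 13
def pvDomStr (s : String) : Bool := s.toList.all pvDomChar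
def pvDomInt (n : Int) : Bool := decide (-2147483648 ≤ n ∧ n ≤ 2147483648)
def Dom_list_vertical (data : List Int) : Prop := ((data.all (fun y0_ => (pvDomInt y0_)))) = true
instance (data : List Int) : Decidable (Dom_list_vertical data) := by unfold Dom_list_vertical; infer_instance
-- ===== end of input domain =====

-- B replaces A's nested column-major loops with one row-major pass distributing data[i] into columns[i % 3] (alternative decomposition, same cost).


-- ===== PORT A =====
-- A: for col in range(3): for row in range(0, 9, 3): c.append(data[row+col]).
-- data[row+col] is ported with pyGet? (none = IndexError); Pre_ guarantees it is some, .getD 0 only discharges the option.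
def list_vertical (data : List Int) : List (List Int) :=
  (PySem.List.pyRange 0 3 1).foldl (fun l col =>
    l ++ [(PySem.List.pyRange 0 9 3).foldl (fun c row =>
      c ++ [(PySem.List.pyGet? data (row + col)).getD 0]) []]) []

-- ===== PORT B =====
-- helper for columns[k].append(x): append x to the k-th list
def pvAppendAt (cols : List (List Int)) (k : Nat) (x : Int) : List (List Int) :=
  match cols, k with
  | [], _ => []
  | c :: rest, 0 => (c ++ [x]) :: rest
  | c :: rest, Nat.succ k' => c :: pvAppendAt rest k' x

-- B: columns = [[],[],[]]; for i in range(9): columns[i % 3].append(data[i])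
def list_vertical_alt (data : List Int) : List (List Int) :=
  (PySem.List.pyRange 0 9 1).foldl (fun cols i =>
    pvAppendAt cols (PySem.Int.mod i 3).toNat ((PySem.List.pyGet? data i).getD 0))
    [[], [], []]

-- ===== PRECONDITION & SPEC =====
-- Pre_: A (and B) raise IndexError unless data has at least 9 elements.
def Pre_list_vertical (data : List Int) : Prop := 9 ≤ data.length
instance (data : List Int) : Decidable (Pre_list_vertical data) := by unfold Pre_list_vertical; infer_instance
def pvWitness_list_vertical : List Int := [1, 2, 3, 4, 5, 6, 7, 8, 9]

def Spec_list_vertical (data : List Int) (out : List (List Int)) : Prop := out = list_vertical_alt data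
instance (data : List Int) (out : List (List Int)) : Decidable (Spec_list_vertical data out) := by unfold Spec_list_vertical; infer_instance

-- ===== CLAIM (what is proved, stated in full; the proofs are below) =====
def Claim_equal_list_vertical : Prop := ∀ (data : List Int), Dom_list_vertical data → Pre_list_vertical data → Spec_list_vertical data (list_vertical data)

-- ===== LEMMAS AND PROOFS =====

-- ===== VERDICT (by name: the statement is the Claim_ definition above) =====
theorem list_vertical_spec : Claim_equal_list_vertical := by
  intro data _ hpre
  unfold Pre_list_vertical at hpre
  match data, hpre with
  | a :: b :: c :: d :: e :: f :: g :: h :: i :: rest, _ =>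
    show Spec_list_vertical _ _
    unfold Spec_list_vertical list_vertical list_vertical_alt
    simp [PySem.List.pyRange, PySem.List.pyGet?, PySem.List.pyIdx?, PySem.Int.mod, pvAppendAt, List.range_succ, Int.fmod]
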